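-- pv_equiv track=rewrite | github.com/Ismail-Armutcu/qos_aware_leo_clustering | run_walker_size.py | _valid_pairs
-- ===== SOURCE A (Python) =====
-- def _valid_pairs(total_sats_values: list[int], n_planes_values: list[int]) -> list[tuple[int, int]]:
--     pairs: list[tuple[int, int]] = []
--     for total_sats in total_sats_values:
--         for n_planes in n_planes_values:
--             if int(n_planes) <= 0:
--                 continue
--             if int(total_sats) % int(n_planes) == 0:
--                 pairs.append((int(total_sats), int(n_planes)))
--     pairs.sort(key=lambda x: (x[0], x[1]))
--     return pairs
-- ===== SOURCE B (Python) =====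
-- def _valid_pairs(total_sats_values: list[int], n_planes_values: list[int]) -> list[tuple[int, int]]:
--     # Count multiplicities once, then emit pairs over sorted distinct keys:
--     # the output comes out already sorted, so no final sort is needed.
--     ct: dict[int, int] = {}
--     for t in total_sats_values:
--         ct[int(t)] = ct.get(int(t), 0) + 1
--     cp: dict[int, int] = {}
--     for p in n_planes_values:
--         if int(p) > 0:
--             cp[int(p)] = cp.get(int(p), 0) + 1
--     out: list[tuple[int, int]] = []
--     for t in sorted(ct):
--         for p in sorted(cp):
--             if t % p == 0:
--                 out.extend([(t, p)] * (ct[t] * cp[p]))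
--     return out
-- ===== Notes on version B (the rewrite author's own statement) =====
-- stated objective: alternative
-- what changed: B replaces 'collect all (total,planes) pairs then sort them' by building two multiplicity counters, iterating the sorted distinct values only and emitting each divisible pair with its multiplicity, so the output needs no final sort.
import Mathlib
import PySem

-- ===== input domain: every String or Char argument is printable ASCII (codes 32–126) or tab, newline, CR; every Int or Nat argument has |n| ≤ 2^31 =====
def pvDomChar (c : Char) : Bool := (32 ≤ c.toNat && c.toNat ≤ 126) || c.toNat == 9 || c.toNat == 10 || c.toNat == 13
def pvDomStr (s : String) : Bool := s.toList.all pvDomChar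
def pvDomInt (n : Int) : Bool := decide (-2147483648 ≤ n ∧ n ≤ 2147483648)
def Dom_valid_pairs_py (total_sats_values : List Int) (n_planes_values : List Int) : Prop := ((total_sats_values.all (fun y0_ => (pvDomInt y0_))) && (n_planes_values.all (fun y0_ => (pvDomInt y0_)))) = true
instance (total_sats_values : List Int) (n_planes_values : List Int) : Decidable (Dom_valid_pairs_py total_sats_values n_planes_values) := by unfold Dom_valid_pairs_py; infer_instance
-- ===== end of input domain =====

-- B replaces "collect all pairs then sort" by dict counters over the distinct values,
-- emitting multiplicity-expanded pairs over sorted distinct keys so no final sort is needed.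


-- ===== PORT A =====
def valid_pairs_py (total_sats_values : List Int) (n_planes_values : List Int) : List (Int × Int) :=
  PySem.List.sorted2
    (total_sats_values.foldl (fun pairs total_sats =>
      n_planes_values.foldl (fun pairs n_planes =>
        if n_planes ≤ 0 then pairs
        else if PySem.Int.mod total_sats n_planes = 0 then pairs ++ [(total_sats, n_planes)]
        else pairs) pairs) [])
    Prod.fst Prod.snd

-- ===== PORT B =====
-- the emitting double loop of B over the two counter dicts
def valid_pairs_py_alt_emit (ct cp : PySem.Dict Int Int) : List (Int × Int) :=
  (PySem.List.sorted ct.keys (fun x => x)).foldl (fun out t =>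
    (PySem.List.sorted cp.keys (fun x => x)).foldl (fun out p =>
      if PySem.Int.mod t p = 0 then
        out ++ PySem.List.pyRepeat [(t, p)] (ct.getD t 0 * cp.getD p 0)
      else out) out) []

-- B counts multiplicities in two dicts, then emits over the sorted distinct keys with
-- multiplicity expansion; Python's ct[t]/cp[p] is ported as getD (the key is always present).
def valid_pairs_py_alt (total_sats_values : List Int) (n_planes_values : List Int) : List (Int × Int) :=
  valid_pairs_py_alt_emit
    (total_sats_values.foldl (fun d t => d.insert t (d.getD t 0 + 1)) PySem.Dict.empty)
    (n_planes_values.foldl (fun d p => if 0 < p then d.insert p (d.getD p 0 + 1) else d) PySem.Dict.empty)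

-- ===== PRECONDITION & SPEC =====
def Spec_valid_pairs_py (total_sats_values : List Int) (n_planes_values : List Int) (out : List (Int × Int)) : Prop := out = valid_pairs_py_alt total_sats_values n_planes_values
instance (total_sats_values : List Int) (n_planes_values : List Int) (out : List (Int × Int)) : Decidable (Spec_valid_pairs_py total_sats_values n_planes_values out) := by unfold Spec_valid_pairs_py; infer_instance

-- ===== CLAIM (what is proved, stated in full; the proofs are below) =====
def Claim_equal_valid_pairs_py : Prop := ∀ (total_sats_values : List Int) (n_planes_values : List Int), Dom_valid_pairs_py total_sats_values n_planes_values → Spec_valid_pairs_py total_sats_values n_planes_values (valid_pairs_py total_sats_values n_planes_values)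

-- ===== LEMMAS AND PROOFS =====

-- lexicographic ≤ on pairs (the order of A's sort key) and the boolean strict order sorted2 uses
def lexLE (a b : Int × Int) : Prop := a.1 < b.1 ∨ (a.1 = b.1 ∧ a.2 ≤ b.2)

def lexLT (a b : Int × Int) : Bool :=
  decide (a.1 < b.1) || (!decide (b.1 < a.1) && decide (a.2 < b.2))

-- the pair condition A tests (positivity, divisibility)
def Qb (t p : Int) : Bool := decide (0 < p) && decide (PySem.Int.mod t p = 0)

-- the multiset of pairs A collects before sorting
def Acollect (xs ys : List Int) : List (Int × Int) :=
  xs.flatMap (fun t => (ys.filter (Qb t)).map (fun p => (t, p)))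

-- the flat form of B's output
def Bflat (st pl : List Int) (ca cb : Int → Nat) : List (Int × Int) :=
  st.flatMap (fun t => pl.flatMap (fun p =>
    if PySem.Int.mod t p = 0 then List.replicate (ca t * cb p) (t, p) else []))

theorem lexLE_antisymm (a b : Int × Int) (h1 : lexLE a b) (h2 : lexLE b a) : a = b := by
  unfold lexLE at h1 h2
  have : a.1 = b.1 ∧ a.2 = b.2 := by omega
  exact Prod.ext this.1 this.2

theorem valid_pairs_py_eq_sorted2 (xs ys : List Int) :
    valid_pairs_py xs ys = PySem.List.sorted2 (Acollect xs ys) Prod.fst Prod.snd := by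
  unfold valid_pairs_py Acollect
  congr 1
  have hinner : ∀ (t : Int) (acc : List (Int × Int)),
      ys.foldl (fun pairs n_planes =>
        if n_planes ≤ 0 then pairs
        else if PySem.Int.mod t n_planes = 0 then pairs ++ [(t, n_planes)]
        else pairs) acc = acc ++ (ys.filter (Qb t)).map (fun p => (t, p)) := by
    intro t acc
    rw [← PySem.List.foldl_append_if (Qb t) (fun p => (t, p)) ys acc]
    congr 1
    funext pairs p
    by_cases h1 : p ≤ 0 <;> by_cases h2 : PySem.Int.mod t p = 0 <;>
      simp [Qb, h1, h2]
  calc xs.foldl (fun pairs total_sats =>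
        ys.foldl (fun pairs n_planes =>
          if n_planes ≤ 0 then pairs
          else if PySem.Int.mod total_sats n_planes = 0 then pairs ++ [(total_sats, n_planes)]
          else pairs) pairs) []
      = xs.foldl (fun pairs t => pairs ++ (ys.filter (Qb t)).map (fun p => (t, p))) [] := by
        congr 1; funext pairs t; exact hinner t pairs
    _ = _ := by
        rw [PySem.List.foldl_append_eq_flatMap]; rfl

theorem sorted2_eq_foldl (zs : List (Int × Int)) :
    PySem.List.sorted2 zs Prod.fst Prod.snd =
      zs.foldl (fun acc x => PySem.List.insertBy lexLT x acc) [] := rfl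

theorem insertBy_lex_pairwise (x : Int × Int) (ys : List (Int × Int))
    (h : ys.Pairwise lexLE) : (PySem.List.insertBy lexLT x ys).Pairwise lexLE := by
  induction ys with
  | nil => simp [PySem.List.insertBy]
  | cons y ys ih =>
    rw [List.pairwise_cons] at h
    rw [PySem.List.insertBy]
    by_cases hb : lexLT x y = true
    · rw [if_pos hb]
      have hxy : lexLE x y := by
        unfold lexLT at hb; unfold lexLE
        simp only [Bool.or_eq_true, Bool.and_eq_true, Bool.not_eq_true',
          decide_eq_true_eq, decide_eq_false_iff_not] at hb
        omega
      refine List.pairwise_cons.2 ⟨?_, List.pairwise_cons.2 ⟨h.1, h.2⟩⟩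
      intro z hz
      rcases List.mem_cons.1 hz with rfl | hz
      · exact hxy
      · have hyz := h.1 z hz
        unfold lexLE at hxy hyz ⊢; omega
    · rw [if_neg hb]
      have hyx : lexLE y x := by
        unfold lexLT at hb; unfold lexLE
        simp only [Bool.or_eq_true, Bool.and_eq_true, Bool.not_eq_true',
          decide_eq_true_eq, decide_eq_false_iff_not, not_or, not_and] at hb
        omega
      refine List.pairwise_cons.2 ⟨?_, ih h.2⟩
      intro z hz
      rcases (PySem.List.mem_insertBy lexLT x z ys).1 hz with rfl | hz
      · exact hyx
      · exact h.1 z hz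

theorem sorted2_pairwise_lex (zs : List (Int × Int)) :
    (PySem.List.sorted2 zs Prod.fst Prod.snd).Pairwise lexLE := by
  rw [sorted2_eq_foldl]
  suffices h : ∀ (acc : List (Int × Int)), acc.Pairwise lexLE →
      (zs.foldl (fun acc x => PySem.List.insertBy lexLT x acc) acc).Pairwise lexLE by
    exact h [] (by simp)
  induction zs with
  | nil => intro acc hacc; exact hacc
  | cons z zs ih =>
    intro acc hacc
    exact ih _ (insertBy_lex_pairwise z acc hacc)

-- B's port unfolds to Bflat over the sorted distinct values with count multiplicities
theorem valid_pairs_py_alt_eq_Bflat (xs ys : List Int) :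
    valid_pairs_py_alt xs ys =
      Bflat (PySem.List.sorted (PySem.Set.ofList xs) (fun x => x))
            (PySem.List.sorted (PySem.Set.ofList (ys.filter (fun p => decide (0 < p)))) (fun x => x))
            (fun t => xs.count t) (fun p => (ys.filter (fun p => decide (0 < p))).count p) := by
  unfold valid_pairs_py_alt valid_pairs_py_alt_emit Bflat
  have hcp : (ys.foldl (fun d p => if 0 < p then d.insert p (d.getD p 0 + 1) else d)
        (PySem.Dict.empty : PySem.Dict Int Int)) =
      ((ys.filter (fun p => decide (0 < p))).foldl
        (fun d p => d.insert p (d.getD p 0 + 1)) (PySem.Dict.empty : PySem.Dict Int Int)) := by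
    rw [List.foldl_filter]
    congr 1; funext d p
    by_cases h : 0 < p <;> simp [h]
  simp only [hcp]
  have hkeys : ∀ (l : List Int),
      (l.foldl (fun d t => d.insert t (d.getD t 0 + 1)) (PySem.Dict.empty : PySem.Dict Int Int)).keys =
        PySem.Set.ofList l := by
    intro l
    rw [PySem.Dict.keys_foldl_insert_key l (fun x => x) (fun d x => d.getD x 0 + 1)]
    simp [PySem.Set.update, PySem.Set.ofList, PySem.Dict.keys_empty]
  have hgetD : ∀ (l : List Int) (v : Int),
      (l.foldl (fun d t => d.insert t (d.getD t 0 + 1)) (PySem.Dict.empty : PySem.Dict Int Int)).getD v 0 =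
        (l.count v : Int) := by
    intro l v
    rw [PySem.Dict.getD_foldl_insert_add_one]
    simp [PySem.Dict.getD_empty]
  rw [hkeys xs, hkeys (ys.filter (fun p => decide (0 < p)))]
  have hstep : ∀ (t : Int) (out : List (Int × Int)),
      (PySem.List.sorted (PySem.Set.ofList (ys.filter (fun p => decide (0 < p)))) (fun x => x)).foldl
        (fun out p =>
          if PySem.Int.mod t p = 0 then
            out ++ PySem.List.pyRepeat [(t, p)]
              ((xs.foldl (fun d t => d.insert t (d.getD t 0 + 1)) (PySem.Dict.empty : PySem.Dict Int Int)).getD t 0 *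
               ((ys.filter (fun p => decide (0 < p))).foldl
                  (fun d p => d.insert p (d.getD p 0 + 1)) (PySem.Dict.empty : PySem.Dict Int Int)).getD p 0)
          else out) out =
      out ++ (PySem.List.sorted (PySem.Set.ofList (ys.filter (fun p => decide (0 < p)))) (fun x => x)).flatMap
        (fun p => if PySem.Int.mod t p = 0 then
            List.replicate (xs.count t * (ys.filter (fun p => decide (0 < p))).count p) (t, p)
          else []) := by
    intro t out
    rw [← PySem.List.foldl_append_eq_flatMap]
    congr 1; funext out p
    rw [hgetD xs t, hgetD (ys.filter (fun p => decide (0 < p))) p]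
    by_cases h : PySem.Int.mod t p = 0
    · rw [if_pos h, if_pos h, PySem.List.pyRepeat_singleton, ← Nat.cast_mul, Int.toNat_natCast]
    · simp [h]
  calc (PySem.List.sorted (PySem.Set.ofList xs) (fun x => x)).foldl _ []
      = (PySem.List.sorted (PySem.Set.ofList xs) (fun x => x)).foldl
          (fun out t => out ++ (PySem.List.sorted (PySem.Set.ofList (ys.filter (fun p => decide (0 < p)))) (fun x => x)).flatMap
            (fun p => if PySem.Int.mod t p = 0 then
                List.replicate (xs.count t * (ys.filter (fun p => decide (0 < p))).count p) (t, p)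
              else [])) [] := by
        congr 1; funext out t; exact hstep t out
    _ = _ := by rw [PySem.List.foldl_append_eq_flatMap]; rfl

-- membership shape of Bflat blocks
theorem mem_Bflat_inner {t : Int} {pl : List Int} {ca cb : Int → Nat} {z : Int × Int}
    (hz : z ∈ pl.flatMap (fun p =>
      if PySem.Int.mod t p = 0 then List.replicate (ca t * cb p) (t, p) else [])) :
    z.1 = t ∧ z.2 ∈ pl := by
  rcases List.mem_flatMap.1 hz with ⟨p, hp, hzin⟩
  by_cases h : PySem.Int.mod t p = 0
  · rw [if_pos h] at hzin
    rcases List.eq_of_mem_replicate hzin with rfl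
    exact ⟨rfl, hp⟩
  · rw [if_neg h] at hzin; cases hzin

theorem Bflat_pairwise (st pl : List Int) (ca cb : Int → Nat)
    (hst : st.Pairwise (· < ·)) (hpl : pl.Pairwise (· < ·)) :
    (Bflat st pl ca cb).Pairwise lexLE := by
  unfold Bflat
  induction st with
  | nil => simp
  | cons t st ih =>
    rw [List.pairwise_cons] at hst
    rw [List.flatMap_cons, List.pairwise_append]
    refine ⟨?_, ih hst.2, ?_⟩
    · -- the block of t is pairwise
      clear ih
      induction pl with
      | nil => simp
      | cons p pl ihp =>
        rw [List.pairwise_cons] at hpl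
        rw [List.flatMap_cons, List.pairwise_append]
        refine ⟨?_, ihp hpl.2, ?_⟩
        · by_cases h : PySem.Int.mod t p = 0
          · rw [if_pos h]
            rw [List.pairwise_replicate]
            right; unfold lexLE; omega
          · rw [if_neg h]; simp
        · intro a ha b hb
          by_cases h : PySem.Int.mod t p = 0
          · rw [if_pos h] at ha
            rcases List.eq_of_mem_replicate ha with rfl
            have hb' := mem_Bflat_inner (t := t) (pl := pl) (ca := ca) (cb := cb) hb
            have := hpl.1 b.2 hb'.2
            unfold lexLE; omega
          · rw [if_neg h] at ha; cases ha
    · intro a ha b hb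
      have ha' := mem_Bflat_inner (t := t) (pl := pl) (ca := ca) (cb := cb) ha
      rcases List.mem_flatMap.1 hb with ⟨t', ht', hbin⟩
      have hb' := mem_Bflat_inner (t := t') (pl := pl) (ca := ca) (cb := cb) hbin
      have := hst.1 t' ht'
      unfold lexLE; omega

-- counting lemmas
theorem count_map_pair (t a b : Int) (l : List Int) :
    (l.map (fun p => (t, p))).count (a, b) = if t = a then l.count b else 0 := by
  induction l with
  | nil => simp
  | cons p l ih =>
    simp only [List.map_cons, List.count_cons, ih, beq_iff_eq, Prod.mk.injEq]
    by_cases h1 : t = a <;> by_cases h2 : p = b <;> simp [h1, h2]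

theorem count_Acollect (xs ys : List Int) (a b : Int) :
    (Acollect xs ys).count (a, b) =
      xs.count a * (if Qb a b then ys.count b else 0) := by
  unfold Acollect
  induction xs with
  | nil => simp
  | cons t xs ih =>
    rw [List.flatMap_cons, List.count_append, ih, count_map_pair, List.count_cons]
    by_cases h1 : t = a
    · subst h1
      simp only [beq_self_eq_true, if_true]
      by_cases hq : Qb t b = true
      · rw [List.count_filter hq, if_pos hq]; ring
      · have hz : (ys.filter (Qb t)).count b = 0 := by
          rw [List.count_eq_zero]
          intro hmem
          exact hq (List.of_mem_filter hmem)
        simp [hq, hz]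
    · simp [h1]

theorem count_Bflat_inner (t : Int) (pl : List Int) (ca cb : Int → Nat) (a b : Int)
    (hpl : pl.Nodup) :
    (pl.flatMap (fun p =>
      if PySem.Int.mod t p = 0 then List.replicate (ca t * cb p) (t, p) else [])).count (a, b) =
    if t = a ∧ b ∈ pl ∧ PySem.Int.mod a b = 0 then ca a * cb b else 0 := by
  induction pl with
  | nil => simp
  | cons p pl ih =>
    rw [List.nodup_cons] at hpl
    rw [List.flatMap_cons, List.count_append, ih hpl.2]
    have hcnt : (if PySem.Int.mod t p = 0 then List.replicate (ca t * cb p) (t, p)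
        else []).count (a, b) =
        if t = a ∧ p = b ∧ PySem.Int.mod a b = 0 then ca a * cb b else 0 := by
      by_cases h : PySem.Int.mod t p = 0
      · rw [if_pos h, List.count_replicate]
        by_cases h1 : t = a
        · subst h1
          by_cases h2 : p = b
          · subst h2; simp [h]
          · simp [h2, Prod.ext_iff]
        · simp [h1, Prod.ext_iff]
      · rw [if_neg h]
        simp only [List.count_nil]
        by_cases h1 : t = a
        · subst h1
          by_cases h2 : p = b
          · subst h2; simp [h]
          · simp [h2]
        · simp [h1]
    rw [hcnt]
    by_cases h1 : t = a
    · subst h1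
      by_cases h2 : p = b
      · subst h2
        have hb : p ∉ pl := hpl.1
        by_cases h3 : PySem.Int.mod t p = 0
        · simp [h3, hb]
        · simp [h3, hb]
      · simp [h2, List.mem_cons, Ne.symm h2]
    · simp [h1]

theorem count_Bflat (st pl : List Int) (ca cb : Int → Nat) (a b : Int)
    (hst : st.Nodup) (hpl : pl.Nodup) :
    (Bflat st pl ca cb).count (a, b) =
      if a ∈ st ∧ b ∈ pl ∧ PySem.Int.mod a b = 0 then ca a * cb b else 0 := by
  unfold Bflat
  induction st with
  | nil => simp
  | cons t st ih =>
    rw [List.nodup_cons] at hst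
    rw [List.flatMap_cons, List.count_append, ih hst.2,
      count_Bflat_inner t pl ca cb a b hpl]
    by_cases h1 : t = a
    · subst h1
      have h2 : t ∉ st := hst.1
      simp [h2, List.mem_cons]
    · simp [h1, List.mem_cons, Ne.symm h1]

theorem Bflat_perm_Acollect (xs ys : List Int) :
    (Bflat (PySem.List.sorted (PySem.Set.ofList xs) (fun x => x))
        (PySem.List.sorted (PySem.Set.ofList (ys.filter (fun p => decide (0 < p)))) (fun x => x))
        (fun t => xs.count t) (fun p => (ys.filter (fun p => decide (0 < p))).count p)).Perm
      (Acollect xs ys) := by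
  set ys' := ys.filter (fun p => decide (0 < p)) with hys'
  rw [List.perm_iff_count]
  rintro ⟨a, b⟩
  have hstnd : (PySem.List.sorted (PySem.Set.ofList xs) (fun x => x)).Nodup :=
    ((PySem.List.sorted_perm (PySem.Set.ofList xs) (fun x => x) false).nodup_iff).2
      (PySem.Set.nodup_ofList xs)
  have hplnd : (PySem.List.sorted (PySem.Set.ofList ys') (fun x => x)).Nodup :=
    ((PySem.List.sorted_perm (PySem.Set.ofList ys') (fun x => x) false).nodup_iff).2
      (PySem.Set.nodup_ofList ys')
  rw [count_Bflat _ _ _ _ a b hstnd hplnd, count_Acollect xs ys a b]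
  have hmemst : a ∈ PySem.List.sorted (PySem.Set.ofList xs) (fun x => x) ↔ a ∈ xs := by
    rw [PySem.List.mem_sorted, PySem.Set.mem_ofList]
  have hmempl : b ∈ PySem.List.sorted (PySem.Set.ofList ys') (fun x => x) ↔ b ∈ ys' := by
    rw [PySem.List.mem_sorted, PySem.Set.mem_ofList]
  simp only [hmemst, hmempl]
  have hbys' : b ∈ ys' ↔ (0 < b ∧ b ∈ ys) := by
    rw [hys', List.mem_filter]; simp [and_comm]
  have hcntys' : ys'.count b = if 0 < b then ys.count b else 0 := by
    by_cases hb : 0 < b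
    · rw [if_pos hb, hys', List.count_filter (by simpa using hb)]
    · rw [if_neg hb, List.count_eq_zero]
      intro hmem; exact hb (hbys'.1 hmem).1
  by_cases h1 : a ∈ xs <;> by_cases h2 : 0 < b <;> by_cases h3 : b ∈ ys <;>
    by_cases h4 : PySem.Int.mod a b = 0 <;>
    simp_all [Qb, List.count_eq_zero]

-- ===== VERDICT (by name: the statement is the Claim_ definition above) =====
theorem valid_pairs_py_spec : Claim_equal_valid_pairs_py := by
  intro xs ys _
  unfold Spec_valid_pairs_py
  rw [valid_pairs_py_eq_sorted2, valid_pairs_py_alt_eq_Bflat]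
  exact List.Perm.eq_of_pairwise
    (fun a b _ _ h1 h2 => lexLE_antisymm a b h1 h2)
    (sorted2_pairwise_lex _)
    (Bflat_pairwise _ _ _ _ (PySem.List.sorted_ofList_pairwise_lt xs)
      (PySem.List.sorted_ofList_pairwise_lt _))
    ((PySem.List.sorted2_perm _ _ _ _).trans
      (Bflat_perm_Acollect xs ys).symm)
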